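-- pv_equiv track=rewrite | github.com/michellejaustin/AI-Finance-Hackathon-Mar-2026 | novaclose_analysis.py | _route_copilot_intent
-- ===== SOURCE A (Python) =====
-- def _route_copilot_intent(prompt):
--     text = (prompt or "").strip().lower()
--
--     if not text:
--         return "general"
--
--     if any(keyword in text for keyword in ["gl agent", "gl approval", "journal approvals", "approval agent"]):
--         return "gl_agent"
--     if any(
--         keyword in text
--         for keyword in ["erp posting", "auto-post", "ready to post", "manual hold", "posting simulator"]
--     ):
--         return "erp_posting"
--     if any(keyword in text for keyword in ["bank agent", "bank reconciliation agent", "bank rec agent", "cash agent"]):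
--         return "bank_agent"
--     if any(
--         keyword in text
--         for keyword in [
--             "ic agent",
--             "intercompany agent",
--             "intercompany reconciliation",
--             "intercompany",
--             "fx mismatch",
--             "transfer pricing",
--         ]
--     ):
--         return "ic_agent"
--     if any(keyword in text for keyword in ["journal agent", "je agent", "journal entry agent", "what should the journal agent post"]):
--         return "journal_agent"
--     if any(
--         keyword in text
--         for keyword in [
--             "checklist agent",
--             "close checklist",
--             "checklist tasks",
--             "unblocked",
--             "unblock",
--             "unblock critical tasks",
--             "waiting on input",
--             "handoff",
--         ]
--     ):
--         return "checklist_agent"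
--     if any(keyword in text for keyword in ["controller", "today", "fix first", "do today", "priority today"]):
--         return "controller_actions"
--     if any(
--         keyword in text
--         for keyword in [
--             "audit",
--             "compliance",
--             "controls",
--             "before posting",
--             "what does audit need to review",
--             "control completeness",
--         ]
--     ):
--         return "audit_agent"
--     if any(keyword in text for keyword in ["riskiest entity", "which entity", "entity risk", "entity is riskiest"]):
--         return "riskiest_entity"
--     if any(keyword in text for keyword in ["variance", "trial balance", "tb", "flux", "mom", "yoy"]):
--         return "flux_agent"
--     if any(keyword in text for keyword in ["automate", "automation", "auto", "automated"]):
--         return "automation_opportunities"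
--     if any(keyword in text for keyword in ["below 4", "under 4", "4 days", "scenario", "simulator"]):
--         return "below_four"
--     if any(keyword in text for keyword in ["cfo", "executive", "summary", "board"]):
--         return "cfo_summary"
--     if any(keyword in text for keyword in ["delay", "blocker", "risk", "close"]):
--         return "close_blockers"
--     return "general"
-- ===== SOURCE B (Python) =====
-- _INTENTS = (
--     "gl_agent",
--     "erp_posting",
--     "bank_agent",
--     "ic_agent",
--     "journal_agent",
--     "checklist_agent",
--     "controller_actions",
--     "audit_agent",
--     "riskiest_entity",
--     "flux_agent",
--     "automation_opportunities",
--     "below_four",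
--     "cfo_summary",
--     "close_blockers",
-- )
--
-- _KEYWORD_GROUPS = (
--     ("gl agent", "gl approval", "journal approvals", "approval agent"),
--     ("erp posting", "auto-post", "ready to post", "manual hold", "posting simulator"),
--     ("bank agent", "bank reconciliation agent", "bank rec agent", "cash agent"),
--     ("ic agent", "intercompany agent", "intercompany reconciliation", "intercompany",
--      "fx mismatch", "transfer pricing"),
--     ("journal agent", "je agent", "journal entry agent", "what should the journal agent post"),
--     ("checklist agent", "close checklist", "checklist tasks", "unblocked", "unblock",
--      "unblock critical tasks", "waiting on input", "handoff"),
--     ("controller", "today", "fix first", "do today", "priority today"),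
--     ("audit", "compliance", "controls", "before posting", "what does audit need to review",
--      "control completeness"),
--     ("riskiest entity", "which entity", "entity risk", "entity is riskiest"),
--     ("variance", "trial balance", "tb", "flux", "mom", "yoy"),
--     ("automate", "automation", "auto", "automated"),
--     ("below 4", "under 4", "4 days", "scenario", "simulator"),
--     ("cfo", "executive", "summary", "board"),
--     ("delay", "blocker", "risk", "close"),
-- )
--
-- # keyword -> priority (index of its group); keywords are pairwise distinct accross groups
-- _KEYWORD_PRIORITY = {}
-- for _p, _kws in enumerate(_KEYWORD_GROUPS):
--     for _kw in _kws:
--         _KEYWORD_PRIORITY[_kw] = _p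
--
-- _MAX_KW_LEN = max(len(_kw) for _kw in _KEYWORD_PRIORITY)
--
--
-- def _route_copilot_intent(prompt):
--     # Text-driven scan: hash every window text[i:j] (j - i bounded by the longest
--     # keyword) into the keyword->priority dict, keeping the smallest priority seen.
--     text = (prompt or "").strip().lower()
--     n = len(text)
--     best = len(_INTENTS)
--     for i in range(n):
--         limit = min(n, i + _MAX_KW_LEN)
--         for j in range(i + 1, limit + 1):
--             p = _KEYWORD_PRIORITY.get(text[i : j])
--             if p is not None and p < best:
--                 best = p
--     return _INTENTS[best] if best < len(_INTENTS) else "general"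
-- ===== Notes on version B (the rewrite author's own statement) =====
-- stated objective: alternative
-- what changed: Replaced the keyword-driven cascade of any(kw in text) substring searches by a text-driven window scan: every substring text[i:j] with window length bounded by the longest keyword is looked up in a precomputed keyword->priority dict and the smallest priority seen wins; there is no early exit, no per-keyword search, and no empty-text guard.
import Mathlib
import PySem

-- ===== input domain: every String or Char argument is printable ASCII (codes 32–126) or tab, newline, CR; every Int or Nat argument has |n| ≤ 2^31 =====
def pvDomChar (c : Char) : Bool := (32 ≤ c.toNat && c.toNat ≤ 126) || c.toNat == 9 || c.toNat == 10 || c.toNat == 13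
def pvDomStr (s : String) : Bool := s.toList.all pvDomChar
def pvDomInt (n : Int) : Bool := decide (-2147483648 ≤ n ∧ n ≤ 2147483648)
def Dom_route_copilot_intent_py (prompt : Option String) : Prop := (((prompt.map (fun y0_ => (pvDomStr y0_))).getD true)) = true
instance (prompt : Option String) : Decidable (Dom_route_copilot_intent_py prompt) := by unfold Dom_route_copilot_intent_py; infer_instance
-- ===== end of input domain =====

-- B replaces A's keyword-driven cascade (one substring search per keyword) by a
-- text-driven window scan: each substring text[i:j] of bounded length is looked up
-- in a keyword->priority dict and the smallest priority seen wins (objective: alternative).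

-- ===== PORT A =====
-- Literal transliteration of A's if-cascade; 'keyword in text' is PySem.Str.isIn.
def route_copilot_intent_py (prompt : Option String) : String :=
  let text := PySem.Str.lower (PySem.Str.strip (prompt.getD ""))
  if text = "" then "general"
  else if ["gl agent", "gl approval", "journal approvals", "approval agent"].any
      (fun keyword => PySem.Str.isIn keyword text) then "gl_agent"
  else if ["erp posting", "auto-post", "ready to post", "manual hold", "posting simulator"].any
      (fun keyword => PySem.Str.isIn keyword text) then "erp_posting"
  else if ["bank agent", "bank reconciliation agent", "bank rec agent", "cash agent"].any
      (fun keyword => PySem.Str.isIn keyword text) then "bank_agent"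
  else if ["ic agent", "intercompany agent", "intercompany reconciliation", "intercompany",
      "fx mismatch", "transfer pricing"].any
      (fun keyword => PySem.Str.isIn keyword text) then "ic_agent"
  else if ["journal agent", "je agent", "journal entry agent", "what should the journal agent post"].any
      (fun keyword => PySem.Str.isIn keyword text) then "journal_agent"
  else if ["checklist agent", "close checklist", "checklist tasks", "unblocked", "unblock",
      "unblock critical tasks", "waiting on input", "handoff"].any
      (fun keyword => PySem.Str.isIn keyword text) then "checklist_agent"
  else if ["controller", "today", "fix first", "do today", "priority today"].any
      (fun keyword => PySem.Str.isIn keyword text) then "controller_actions"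
  else if ["audit", "compliance", "controls", "before posting", "what does audit need to review",
      "control completeness"].any
      (fun keyword => PySem.Str.isIn keyword text) then "audit_agent"
  else if ["riskiest entity", "which entity", "entity risk", "entity is riskiest"].any
      (fun keyword => PySem.Str.isIn keyword text) then "riskiest_entity"
  else if ["variance", "trial balance", "tb", "flux", "mom", "yoy"].any
      (fun keyword => PySem.Str.isIn keyword text) then "flux_agent"
  else if ["automate", "automation", "auto", "automated"].any
      (fun keyword => PySem.Str.isIn keyword text) then "automation_opportunities"
  else if ["below 4", "under 4", "4 days", "scenario", "simulator"].any
      (fun keyword => PySem.Str.isIn keyword text) then "below_four"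
  else if ["cfo", "executive", "summary", "board"].any
      (fun keyword => PySem.Str.isIn keyword text) then "cfo_summary"
  else if ["delay", "blocker", "risk", "close"].any
      (fun keyword => PySem.Str.isIn keyword text) then "close_blockers"
  else "general"

-- ===== PORT B =====
-- B's module-level constants _INTENTS and _KEYWORD_GROUPS.
def intents : List String :=
  ["gl_agent", "erp_posting", "bank_agent", "ic_agent", "journal_agent", "checklist_agent",
   "controller_actions", "audit_agent", "riskiest_entity", "flux_agent",
   "automation_opportunities", "below_four", "cfo_summary", "close_blockers"]

def keywordGroups : List (List String) :=
  [["gl agent", "gl approval", "journal approvals", "approval agent"],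
   ["erp posting", "auto-post", "ready to post", "manual hold", "posting simulator"],
   ["bank agent", "bank reconciliation agent", "bank rec agent", "cash agent"],
   ["ic agent", "intercompany agent", "intercompany reconciliation", "intercompany",
    "fx mismatch", "transfer pricing"],
   ["journal agent", "je agent", "journal entry agent", "what should the journal agent post"],
   ["checklist agent", "close checklist", "checklist tasks", "unblocked", "unblock",
    "unblock critical tasks", "waiting on input", "handoff"],
   ["controller", "today", "fix first", "do today", "priority today"],
   ["audit", "compliance", "controls", "before posting", "what does audit need to review",
    "control completeness"],
   ["riskiest entity", "which entity", "entity risk", "entity is riskiest"],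
   ["variance", "trial balance", "tb", "flux", "mom", "yoy"],
   ["automate", "automation", "auto", "automated"],
   ["below 4", "under 4", "4 days", "scenario", "simulator"],
   ["cfo", "executive", "summary", "board"],
   ["delay", "blocker", "risk", "close"]]

-- B's module-level dict-building loop: _KEYWORD_PRIORITY[kw] = group index.
def keywordPriority : PySem.Dict String Int :=
  (PySem.List.enumerate keywordGroups 0).foldl
    (fun d pk => pk.2.foldl (fun d kw => d.insert kw pk.1) d) PySem.Dict.empty

-- B's _MAX_KW_LEN = max(len(kw) for kw in _KEYWORD_PRIORITY) (the keys list is nonempty).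
def maxKwLen : Int :=
  match PySem.List.max? (PySem.Dict.keys keywordPriority) PySem.Str.len with
  | some kw => PySem.Str.len kw
  | none => 0

-- B's function: double loop over window positions, min-priority accumulator.
def route_copilot_intent_py_alt (prompt : Option String) : String :=
  let text := PySem.Str.lower (PySem.Str.strip (prompt.getD ""))
  let n := PySem.Str.len text
  let best := (PySem.List.pyRange 0 n 1).foldl (fun best i =>
      let limit := min n (i + maxKwLen)
      (PySem.List.pyRange (i + 1) (limit + 1) 1).foldl (fun best j =>
        match PySem.Dict.get? keywordPriority (PySem.Str.slice text (some i) (some j)) with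
        | some p => if p < best then p else best
        | none => best) best)
    (PySem.List.len intents)
  if best < PySem.List.len intents then PySem.List.pyGetD intents best "" else "general"

-- ===== PRECONDITION & SPEC =====
def Spec_route_copilot_intent_py (prompt : Option String) (out : String) : Prop := out = route_copilot_intent_py_alt prompt
instance (prompt : Option String) (out : String) : Decidable (Spec_route_copilot_intent_py prompt out) := by unfold Spec_route_copilot_intent_py; infer_instance

-- ===== CLAIM (what is proved, stated in full; the proofs are below) =====
def Claim_equal_route_copilot_intent_py : Prop := ∀ (prompt : Option String), Dom_route_copilot_intent_py prompt → Spec_route_copilot_intent_py prompt (route_copilot_intent_py prompt)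

-- ===== LEMMAS AND PROOFS =====

-- 'matched text p' : some keyword of priority p occurs in text.
def pvMatched (text : String) (p : Int) : Prop :=
  ∃ kw, PySem.Dict.get? keywordPriority kw = some p ∧ PySem.Str.isIn kw text = true

-- the fold step of B's inner loop, abstracted over the Option looked up
def pvStep (b : Int) (o : Option Int) : Int :=
  match o with
  | some p => if p < b then p else b
  | none => b

lemma pvStep_le (o : Option Int) (b : Int) : pvStep b o ≤ b := by
  cases o with
  | none => simp [pvStep]
  | some p => simp only [pvStep]; split <;> omega

lemma foldl_pvStep_le (L : List (Option Int)) (b0 : Int) : L.foldl pvStep b0 ≤ b0 := by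
  induction L generalizing b0 with
  | nil => simp
  | cons o L ih => exact le_trans (ih (pvStep b0 o)) (pvStep_le o b0)

lemma foldl_pvStep_mem (L : List (Option Int)) (b0 : Int) :
    L.foldl pvStep b0 = b0 ∨ some (L.foldl pvStep b0) ∈ L := by
  induction L generalizing b0 with
  | nil => left; rfl
  | cons o L ih =>
    rw [List.foldl_cons]
    rcases ih (pvStep b0 o) with h | h
    · rw [h]
      cases o with
      | none => left; rfl
      | some p =>
        by_cases hp : p < b0
        · right; simp [pvStep, hp]
        · left; simp [pvStep, hp]
    · right; exact List.mem_cons_of_mem _ h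

lemma foldl_pvStep_min (L : List (Option Int)) (b0 p : Int) (hp : some p ∈ L) :
    L.foldl pvStep b0 ≤ p := by
  induction L generalizing b0 with
  | nil => simp at hp
  | cons o L ih =>
    rcases List.mem_cons.mp hp with h | h
    · subst h
      rw [List.foldl_cons]
      refine le_trans (foldl_pvStep_le L _) ?_
      simp only [pvStep]; split <;> omega
    · exact ih (pvStep b0 o) h

-- facts about the concrete dict (closed terms, evaluated by the kernel)
set_option maxRecDepth 40000 in
lemma keys_nodup : (PySem.Dict.keys keywordPriority).Nodup := by decide

set_option maxRecDepth 40000 in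
lemma keys_len_bounds : ∀ kw ∈ PySem.Dict.keys keywordPriority,
    1 ≤ kw.toList.length ∧ kw.toList.length ≤ 34 := by decide

set_option maxRecDepth 40000 in
lemma maxKwLen_eq : maxKwLen = 34 := by decide

-- the items of the dict, re-expressed as the flattening of the enumerated groups
def pvPairs : List (String × Int) :=
  (PySem.List.enumerate keywordGroups 0).flatMap (fun pk => pk.2.map (fun kw => (kw, pk.1)))

set_option maxRecDepth 40000 in
lemma items_eq : PySem.Dict.items keywordPriority = pvPairs := by decide

lemma get?_iff_mem_items (kw : String) (p : Int) :
    PySem.Dict.get? keywordPriority kw = some p ↔ (kw, p) ∈ PySem.Dict.items keywordPriority :=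
  PySem.Dict.get?_eq_some_iff_mem_items _ _ _ keys_nodup

lemma mem_keys_of_get? (kw : String) (p : Int)
    (h : PySem.Dict.get? keywordPriority kw = some p) : kw ∈ PySem.Dict.keys keywordPriority := by
  by_contra hn
  rw [← PySem.Dict.get?_eq_none_iff_not_mem_keys] at hn
  rw [h] at hn
  simp at hn

-- the flat list of all window lookups B performs
def pvLookups (text : String) (n : Int) : List (Option Int) :=
  (PySem.List.pyRange 0 n 1).flatMap (fun i =>
    (PySem.List.pyRange (i + 1) ((min n (i + maxKwLen)) + 1) 1).map (fun j =>
      PySem.Dict.get? keywordPriority (PySem.Str.slice text (some i) (some j))))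

-- B's double fold equals one flat fold over all window lookups
set_option maxRecDepth 40000 in
lemma double_fold_eq (text : String) (n b0 : Int) :
    (PySem.List.pyRange 0 n 1).foldl (fun best i =>
      (PySem.List.pyRange (i + 1) ((min n (i + maxKwLen)) + 1) 1).foldl (fun best j =>
        match PySem.Dict.get? keywordPriority (PySem.Str.slice text (some i) (some j)) with
        | some p => if p < best then p else best
        | none => best) best) b0
    = (pvLookups text n).foldl pvStep b0 := by
  unfold pvLookups
  rw [List.foldl_flatMap]
  simp only [List.foldl_map]
  congr 1

-- membership in the flat lookup list ↔ some keyword of that priority occurs in text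
lemma mem_lookups_iff (text : String) (p : Int) :
    some p ∈ pvLookups text (PySem.Str.len text) ↔ pvMatched text p := by
  unfold pvLookups
  rw [List.mem_flatMap]
  constructor
  · rintro ⟨i, hi, hmem⟩
    rw [List.mem_map] at hmem
    obtain ⟨j, hj, hget⟩ := hmem
    rw [PySem.List.mem_pyRange_one] at hi hj
    refine ⟨PySem.Str.slice text (some i) (some j), hget, ?_⟩
    rw [PySem.Str.isIn_eq, PySem.Str.toList_slice, PySem.Chars.slice_eq_listSlice,
      PySem.Chars.isIn_iff_infix]
    rw [PySem.List.slice_toNat _ hi.1 (by omega : (0:Int) ≤ j)]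
    exact ((List.take_prefix _ _).isInfix).trans ((List.drop_suffix _ _).isInfix)
  · rintro ⟨kw, hget, hin⟩
    obtain ⟨hlen1, hlen34⟩ := keys_len_bounds kw (mem_keys_of_get? kw p hget)
    rw [PySem.Str.isIn_eq] at hin
    obtain ⟨i0, hpre⟩ := (PySem.Chars.exists_prefix_drop_iff_isIn kw.toList text.toList).mpr hin
    have hdl : kw.toList.length ≤ text.toList.length - i0 := by
      have := hpre.length_le
      simpa [List.length_drop] using this
    have hi0 : i0 < text.toList.length := by omega
    refine ⟨(i0 : Int), ?_, ?_⟩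
    · rw [PySem.List.mem_pyRange_one, PySem.Str.len_eq]
      constructor
      · exact Int.natCast_nonneg i0
      · exact_mod_cast hi0
    · rw [List.mem_map]
      refine ⟨(i0 : Int) + (kw.toList.length : Int), ?_, ?_⟩
      · rw [PySem.List.mem_pyRange_one, PySem.Str.len_eq, maxKwLen_eq]
        constructor
        · omega
        · have h1 : (i0 : Int) + (kw.toList.length : Int) ≤ (text.toList.length : Int) := by
            omega
          have h2 : (i0 : Int) + (kw.toList.length : Int) ≤ (i0 : Int) + 34 := by omega
          omega
      · have hs : PySem.Str.slice text (some (i0 : Int))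
            (some ((i0 : Int) + (kw.toList.length : Int))) = kw := by
          apply String.toList_inj.mp
          rw [PySem.Str.toList_slice, PySem.Chars.slice_eq_listSlice,
            PySem.List.slice_natCast_add]
          exact (List.prefix_iff_eq_take.mp hpre).symm
        rw [hs]
        exact hget

-- pvMatched in terms of the enumerated keyword groups
lemma pvMatched_iff (text : String) (p : Int) :
    pvMatched text p ↔ ∃ pk ∈ PySem.List.enumerate keywordGroups 0,
      pk.1 = p ∧ pk.2.any (fun kw => PySem.Str.isIn kw text) = true := by
  unfold pvMatched
  simp only [get?_iff_mem_items, items_eq, pvPairs, List.mem_flatMap, List.mem_map,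
    List.any_eq_true, Prod.mk.injEq]
  constructor
  · rintro ⟨kw, ⟨pk, hpk, kw', hkw', rfl, rfl⟩, hin⟩
    exact ⟨pk, hpk, rfl, kw', hkw', hin⟩
  · rintro ⟨pk, hpk, hp, kw, hkw, hin⟩
    exact ⟨kw, ⟨pk, hpk, kw, hkw, rfl, hp⟩, hin⟩

-- the enumerated groups as a literal list
set_option maxRecDepth 40000 in
lemma enum_groups : PySem.List.enumerate keywordGroups 0 =
    [((0 : Int), ["gl agent", "gl approval", "journal approvals", "approval agent"]),
     ((1 : Int), ["erp posting", "auto-post", "ready to post", "manual hold", "posting simulator"]),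
     ((2 : Int), ["bank agent", "bank reconciliation agent", "bank rec agent", "cash agent"]),
     ((3 : Int), ["ic agent", "intercompany agent", "intercompany reconciliation", "intercompany", "fx mismatch", "transfer pricing"]),
     ((4 : Int), ["journal agent", "je agent", "journal entry agent", "what should the journal agent post"]),
     ((5 : Int), ["checklist agent", "close checklist", "checklist tasks", "unblocked", "unblock", "unblock critical tasks", "waiting on input", "handoff"]),
     ((6 : Int), ["controller", "today", "fix first", "do today", "priority today"]),
     ((7 : Int), ["audit", "compliance", "controls", "before posting", "what does audit need to review", "control completeness"]),
     ((8 : Int), ["riskiest entity", "which entity", "entity risk", "entity is riskiest"]),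
     ((9 : Int), ["variance", "trial balance", "tb", "flux", "mom", "yoy"]),
     ((10 : Int), ["automate", "automation", "auto", "automated"]),
     ((11 : Int), ["below 4", "under 4", "4 days", "scenario", "simulator"]),
     ((12 : Int), ["cfo", "executive", "summary", "board"]),
     ((13 : Int), ["delay", "blocker", "risk", "close"])] := by decide
lemma pvMatched_elim (text : String) (p : Int) (h : pvMatched text p) :
    (p = 0 ∧ (["gl agent", "gl approval", "journal approvals", "approval agent"].any (fun keyword => PySem.Str.isIn keyword text)) = true) ∨
      (p = 1 ∧ (["erp posting", "auto-post", "ready to post", "manual hold", "posting simulator"].any (fun keyword => PySem.Str.isIn keyword text)) = true) ∨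
      (p = 2 ∧ (["bank agent", "bank reconciliation agent", "bank rec agent", "cash agent"].any (fun keyword => PySem.Str.isIn keyword text)) = true) ∨
      (p = 3 ∧ (["ic agent", "intercompany agent", "intercompany reconciliation", "intercompany", "fx mismatch", "transfer pricing"].any (fun keyword => PySem.Str.isIn keyword text)) = true) ∨
      (p = 4 ∧ (["journal agent", "je agent", "journal entry agent", "what should the journal agent post"].any (fun keyword => PySem.Str.isIn keyword text)) = true) ∨
      (p = 5 ∧ (["checklist agent", "close checklist", "checklist tasks", "unblocked", "unblock", "unblock critical tasks", "waiting on input", "handoff"].any (fun keyword => PySem.Str.isIn keyword text)) = true) ∨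
      (p = 6 ∧ (["controller", "today", "fix first", "do today", "priority today"].any (fun keyword => PySem.Str.isIn keyword text)) = true) ∨
      (p = 7 ∧ (["audit", "compliance", "controls", "before posting", "what does audit need to review", "control completeness"].any (fun keyword => PySem.Str.isIn keyword text)) = true) ∨
      (p = 8 ∧ (["riskiest entity", "which entity", "entity risk", "entity is riskiest"].any (fun keyword => PySem.Str.isIn keyword text)) = true) ∨
      (p = 9 ∧ (["variance", "trial balance", "tb", "flux", "mom", "yoy"].any (fun keyword => PySem.Str.isIn keyword text)) = true) ∨
      (p = 10 ∧ (["automate", "automation", "auto", "automated"].any (fun keyword => PySem.Str.isIn keyword text)) = true) ∨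
      (p = 11 ∧ (["below 4", "under 4", "4 days", "scenario", "simulator"].any (fun keyword => PySem.Str.isIn keyword text)) = true) ∨
      (p = 12 ∧ (["cfo", "executive", "summary", "board"].any (fun keyword => PySem.Str.isIn keyword text)) = true) ∨
      (p = 13 ∧ (["delay", "blocker", "risk", "close"].any (fun keyword => PySem.Str.isIn keyword text)) = true) := by
  obtain ⟨pk, hpk, hfst, hany⟩ := (pvMatched_iff text p).mp h
  rw [enum_groups] at hpk
  simp only [List.mem_cons, List.not_mem_nil, or_false] at hpk
  rcases hpk with rfl | rfl | rfl | rfl | rfl | rfl | rfl | rfl | rfl | rfl | rfl | rfl | rfl | rfl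
  · exact Or.inl ⟨hfst.symm, hany⟩
  · exact Or.inr (Or.inl ⟨hfst.symm, hany⟩)
  · exact Or.inr (Or.inr (Or.inl ⟨hfst.symm, hany⟩))
  · exact Or.inr (Or.inr (Or.inr (Or.inl ⟨hfst.symm, hany⟩)))
  · exact Or.inr (Or.inr (Or.inr (Or.inr (Or.inl ⟨hfst.symm, hany⟩))))
  · exact Or.inr (Or.inr (Or.inr (Or.inr (Or.inr (Or.inl ⟨hfst.symm, hany⟩)))))
  · exact Or.inr (Or.inr (Or.inr (Or.inr (Or.inr (Or.inr (Or.inl ⟨hfst.symm, hany⟩))))))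
  · exact Or.inr (Or.inr (Or.inr (Or.inr (Or.inr (Or.inr (Or.inr (Or.inl ⟨hfst.symm, hany⟩)))))))
  · exact Or.inr (Or.inr (Or.inr (Or.inr (Or.inr (Or.inr (Or.inr (Or.inr (Or.inl ⟨hfst.symm, hany⟩))))))))
  · exact Or.inr (Or.inr (Or.inr (Or.inr (Or.inr (Or.inr (Or.inr (Or.inr (Or.inr (Or.inl ⟨hfst.symm, hany⟩)))))))))
  · exact Or.inr (Or.inr (Or.inr (Or.inr (Or.inr (Or.inr (Or.inr (Or.inr (Or.inr (Or.inr (Or.inl ⟨hfst.symm, hany⟩))))))))))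
  · exact Or.inr (Or.inr (Or.inr (Or.inr (Or.inr (Or.inr (Or.inr (Or.inr (Or.inr (Or.inr (Or.inr (Or.inl ⟨hfst.symm, hany⟩)))))))))))
  · exact Or.inr (Or.inr (Or.inr (Or.inr (Or.inr (Or.inr (Or.inr (Or.inr (Or.inr (Or.inr (Or.inr (Or.inr (Or.inl ⟨hfst.symm, hany⟩))))))))))))
  · exact Or.inr (Or.inr (Or.inr (Or.inr (Or.inr (Or.inr (Or.inr (Or.inr (Or.inr (Or.inr (Or.inr (Or.inr (Or.inr (⟨hfst.symm, hany⟩)))))))))))))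

-- introduction: a matching group k yields pvMatched text k
lemma pvMatched_intro (text : String) (k : Int) (kws : List String)
    (hmem : (k, kws) ∈ PySem.List.enumerate keywordGroups 0)
    (h : (kws.any (fun keyword => PySem.Str.isIn keyword text)) = true) : pvMatched text k :=
  (pvMatched_iff text k).mpr ⟨(k, kws), hmem, rfl, h⟩

-- ===== VERDICT (by name: the statement is the Claim_ definition above) =====
set_option maxRecDepth 40000 in
theorem route_copilot_intent_py_spec : Claim_equal_route_copilot_intent_py := by
  intro prompt _
  unfold Spec_route_copilot_intent_py
  simp only [route_copilot_intent_py, route_copilot_intent_py_alt]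
  generalize (PySem.Str.lower (PySem.Str.strip (prompt.getD ""))) = text
  by_cases htext : text = ""
  · subst htext
    decide
  · rw [if_neg htext]
    rw [show PySem.List.len intents = (14 : Int) from by decide]
    rw [double_fold_eq text (PySem.Str.len text) 14]
    have hmem := foldl_pvStep_mem (pvLookups text (PySem.Str.len text)) 14
    have hub : ∀ p, pvMatched text p → (pvLookups text (PySem.Str.len text)).foldl pvStep 14 ≤ p :=
      fun p hp => foldl_pvStep_min _ 14 p ((mem_lookups_iff text p).mpr hp)
    set best := (pvLookups text (PySem.Str.len text)).foldl pvStep 14 with hbestdef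
    have hmat : best = 14 ∨ pvMatched text best := by
      rcases hmem with h | h
      · exact Or.inl h
      · exact Or.inr ((mem_lookups_iff text best).mp h)
    by_cases h0 : (["gl agent", "gl approval", "journal approvals", "approval agent"].any (fun keyword => PySem.Str.isIn keyword text)) = true
    · rw [if_pos h0]
      have hk : best = 0 := by
        have hle := hub 0 (pvMatched_intro text 0 ["gl agent", "gl approval", "journal approvals", "approval agent"] (by rw [enum_groups]; simp) h0)
        rcases hmat with h | h
        · omega
        · rcases pvMatched_elim text best h with ⟨he, hc⟩ | ⟨he, hc⟩ | ⟨he, hc⟩ | ⟨he, hc⟩ | ⟨he, hc⟩ | ⟨he, hc⟩ | ⟨he, hc⟩ | ⟨he, hc⟩ | ⟨he, hc⟩ | ⟨he, hc⟩ | ⟨he, hc⟩ | ⟨he, hc⟩ | ⟨he, hc⟩ | ⟨he, hc⟩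
          · omega
          · omega
          · omega
          · omega
          · omega
          · omega
          · omega
          · omega
          · omega
          · omega
          · omega
          · omega
          · omega
          · omega
      rw [hk]
      decide
    rw [if_neg h0]
    by_cases h1 : (["erp posting", "auto-post", "ready to post", "manual hold", "posting simulator"].any (fun keyword => PySem.Str.isIn keyword text)) = true
    · rw [if_pos h1]
      have hk : best = 1 := by
        have hle := hub 1 (pvMatched_intro text 1 ["erp posting", "auto-post", "ready to post", "manual hold", "posting simulator"] (by rw [enum_groups]; simp) h1)
        rcases hmat with h | h
        · omega
        · rcases pvMatched_elim text best h with ⟨he, hc⟩ | ⟨he, hc⟩ | ⟨he, hc⟩ | ⟨he, hc⟩ | ⟨he, hc⟩ | ⟨he, hc⟩ | ⟨he, hc⟩ | ⟨he, hc⟩ | ⟨he, hc⟩ | ⟨he, hc⟩ | ⟨he, hc⟩ | ⟨he, hc⟩ | ⟨he, hc⟩ | ⟨he, hc⟩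
          · exact absurd hc h0
          · omega
          · omega
          · omega
          · omega
          · omega
          · omega
          · omega
          · omega
          · omega
          · omega
          · omega
          · omega
          · omega
      rw [hk]
      decide
    rw [if_neg h1]
    by_cases h2 : (["bank agent", "bank reconciliation agent", "bank rec agent", "cash agent"].any (fun keyword => PySem.Str.isIn keyword text)) = true
    · rw [if_pos h2]
      have hk : best = 2 := by
        have hle := hub 2 (pvMatched_intro text 2 ["bank agent", "bank reconciliation agent", "bank rec agent", "cash agent"] (by rw [enum_groups]; simp) h2)
        rcases hmat with h | h
        · omega
        · rcases pvMatched_elim text best h with ⟨he, hc⟩ | ⟨he, hc⟩ | ⟨he, hc⟩ | ⟨he, hc⟩ | ⟨he, hc⟩ | ⟨he, hc⟩ | ⟨he, hc⟩ | ⟨he, hc⟩ | ⟨he, hc⟩ | ⟨he, hc⟩ | ⟨he, hc⟩ | ⟨he, hc⟩ | ⟨he, hc⟩ | ⟨he, hc⟩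
          · exact absurd hc h0
          · exact absurd hc h1
          · omega
          · omega
          · omega
          · omega
          · omega
          · omega
          · omega
          · omega
          · omega
          · omega
          · omega
          · omega
      rw [hk]
      decide
    rw [if_neg h2]
    by_cases h3 : (["ic agent", "intercompany agent", "intercompany reconciliation", "intercompany", "fx mismatch", "transfer pricing"].any (fun keyword => PySem.Str.isIn keyword text)) = true
    · rw [if_pos h3]
      have hk : best = 3 := by
        have hle := hub 3 (pvMatched_intro text 3 ["ic agent", "intercompany agent", "intercompany reconciliation", "intercompany", "fx mismatch", "transfer pricing"] (by rw [enum_groups]; simp) h3)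
        rcases hmat with h | h
        · omega
        · rcases pvMatched_elim text best h with ⟨he, hc⟩ | ⟨he, hc⟩ | ⟨he, hc⟩ | ⟨he, hc⟩ | ⟨he, hc⟩ | ⟨he, hc⟩ | ⟨he, hc⟩ | ⟨he, hc⟩ | ⟨he, hc⟩ | ⟨he, hc⟩ | ⟨he, hc⟩ | ⟨he, hc⟩ | ⟨he, hc⟩ | ⟨he, hc⟩
          · exact absurd hc h0
          · exact absurd hc h1
          · exact absurd hc h2
          · omega
          · omega
          · omega
          · omega
          · omega
          · omega
          · omega
          · omega
          · omega
          · omega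
          · omega
      rw [hk]
      decide
    rw [if_neg h3]
    by_cases h4 : (["journal agent", "je agent", "journal entry agent", "what should the journal agent post"].any (fun keyword => PySem.Str.isIn keyword text)) = true
    · rw [if_pos h4]
      have hk : best = 4 := by
        have hle := hub 4 (pvMatched_intro text 4 ["journal agent", "je agent", "journal entry agent", "what should the journal agent post"] (by rw [enum_groups]; simp) h4)
        rcases hmat with h | h
        · omega
        · rcases pvMatched_elim text best h with ⟨he, hc⟩ | ⟨he, hc⟩ | ⟨he, hc⟩ | ⟨he, hc⟩ | ⟨he, hc⟩ | ⟨he, hc⟩ | ⟨he, hc⟩ | ⟨he, hc⟩ | ⟨he, hc⟩ | ⟨he, hc⟩ | ⟨he, hc⟩ | ⟨he, hc⟩ | ⟨he, hc⟩ | ⟨he, hc⟩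
          · exact absurd hc h0
          · exact absurd hc h1
          · exact absurd hc h2
          · exact absurd hc h3
          · omega
          · omega
          · omega
          · omega
          · omega
          · omega
          · omega
          · omega
          · omega
          · omega
      rw [hk]
      decide
    rw [if_neg h4]
    by_cases h5 : (["checklist agent", "close checklist", "checklist tasks", "unblocked", "unblock", "unblock critical tasks", "waiting on input", "handoff"].any (fun keyword => PySem.Str.isIn keyword text)) = true
    · rw [if_pos h5]
      have hk : best = 5 := by
        have hle := hub 5 (pvMatched_intro text 5 ["checklist agent", "close checklist", "checklist tasks", "unblocked", "unblock", "unblock critical tasks", "waiting on input", "handoff"] (by rw [enum_groups]; simp) h5)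
        rcases hmat with h | h
        · omega
        · rcases pvMatched_elim text best h with ⟨he, hc⟩ | ⟨he, hc⟩ | ⟨he, hc⟩ | ⟨he, hc⟩ | ⟨he, hc⟩ | ⟨he, hc⟩ | ⟨he, hc⟩ | ⟨he, hc⟩ | ⟨he, hc⟩ | ⟨he, hc⟩ | ⟨he, hc⟩ | ⟨he, hc⟩ | ⟨he, hc⟩ | ⟨he, hc⟩
          · exact absurd hc h0
          · exact absurd hc h1
          · exact absurd hc h2
          · exact absurd hc h3
          · exact absurd hc h4
          · omega
          · omega
          · omega
          · omega
          · omega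
          · omega
          · omega
          · omega
          · omega
      rw [hk]
      decide
    rw [if_neg h5]
    by_cases h6 : (["controller", "today", "fix first", "do today", "priority today"].any (fun keyword => PySem.Str.isIn keyword text)) = true
    · rw [if_pos h6]
      have hk : best = 6 := by
        have hle := hub 6 (pvMatched_intro text 6 ["controller", "today", "fix first", "do today", "priority today"] (by rw [enum_groups]; simp) h6)
        rcases hmat with h | h
        · omega
        · rcases pvMatched_elim text best h with ⟨he, hc⟩ | ⟨he, hc⟩ | ⟨he, hc⟩ | ⟨he, hc⟩ | ⟨he, hc⟩ | ⟨he, hc⟩ | ⟨he, hc⟩ | ⟨he, hc⟩ | ⟨he, hc⟩ | ⟨he, hc⟩ | ⟨he, hc⟩ | ⟨he, hc⟩ | ⟨he, hc⟩ | ⟨he, hc⟩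
          · exact absurd hc h0
          · exact absurd hc h1
          · exact absurd hc h2
          · exact absurd hc h3
          · exact absurd hc h4
          · exact absurd hc h5
          · omega
          · omega
          · omega
          · omega
          · omega
          · omega
          · omega
          · omega
      rw [hk]
      decide
    rw [if_neg h6]
    by_cases h7 : (["audit", "compliance", "controls", "before posting", "what does audit need to review", "control completeness"].any (fun keyword => PySem.Str.isIn keyword text)) = true
    · rw [if_pos h7]
      have hk : best = 7 := by
        have hle := hub 7 (pvMatched_intro text 7 ["audit", "compliance", "controls", "before posting", "what does audit need to review", "control completeness"] (by rw [enum_groups]; simp) h7)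
        rcases hmat with h | h
        · omega
        · rcases pvMatched_elim text best h with ⟨he, hc⟩ | ⟨he, hc⟩ | ⟨he, hc⟩ | ⟨he, hc⟩ | ⟨he, hc⟩ | ⟨he, hc⟩ | ⟨he, hc⟩ | ⟨he, hc⟩ | ⟨he, hc⟩ | ⟨he, hc⟩ | ⟨he, hc⟩ | ⟨he, hc⟩ | ⟨he, hc⟩ | ⟨he, hc⟩
          · exact absurd hc h0
          · exact absurd hc h1
          · exact absurd hc h2
          · exact absurd hc h3
          · exact absurd hc h4
          · exact absurd hc h5
          · exact absurd hc h6
          · omega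
          · omega
          · omega
          · omega
          · omega
          · omega
          · omega
      rw [hk]
      decide
    rw [if_neg h7]
    by_cases h8 : (["riskiest entity", "which entity", "entity risk", "entity is riskiest"].any (fun keyword => PySem.Str.isIn keyword text)) = true
    · rw [if_pos h8]
      have hk : best = 8 := by
        have hle := hub 8 (pvMatched_intro text 8 ["riskiest entity", "which entity", "entity risk", "entity is riskiest"] (by rw [enum_groups]; simp) h8)
        rcases hmat with h | h
        · omega
        · rcases pvMatched_elim text best h with ⟨he, hc⟩ | ⟨he, hc⟩ | ⟨he, hc⟩ | ⟨he, hc⟩ | ⟨he, hc⟩ | ⟨he, hc⟩ | ⟨he, hc⟩ | ⟨he, hc⟩ | ⟨he, hc⟩ | ⟨he, hc⟩ | ⟨he, hc⟩ | ⟨he, hc⟩ | ⟨he, hc⟩ | ⟨he, hc⟩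
          · exact absurd hc h0
          · exact absurd hc h1
          · exact absurd hc h2
          · exact absurd hc h3
          · exact absurd hc h4
          · exact absurd hc h5
          · exact absurd hc h6
          · exact absurd hc h7
          · omega
          · omega
          · omega
          · omega
          · omega
          · omega
      rw [hk]
      decide
    rw [if_neg h8]
    by_cases h9 : (["variance", "trial balance", "tb", "flux", "mom", "yoy"].any (fun keyword => PySem.Str.isIn keyword text)) = true
    · rw [if_pos h9]
      have hk : best = 9 := by
        have hle := hub 9 (pvMatched_intro text 9 ["variance", "trial balance", "tb", "flux", "mom", "yoy"] (by rw [enum_groups]; simp) h9)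
        rcases hmat with h | h
        · omega
        · rcases pvMatched_elim text best h with ⟨he, hc⟩ | ⟨he, hc⟩ | ⟨he, hc⟩ | ⟨he, hc⟩ | ⟨he, hc⟩ | ⟨he, hc⟩ | ⟨he, hc⟩ | ⟨he, hc⟩ | ⟨he, hc⟩ | ⟨he, hc⟩ | ⟨he, hc⟩ | ⟨he, hc⟩ | ⟨he, hc⟩ | ⟨he, hc⟩
          · exact absurd hc h0
          · exact absurd hc h1
          · exact absurd hc h2
          · exact absurd hc h3
          · exact absurd hc h4
          · exact absurd hc h5
          · exact absurd hc h6
          · exact absurd hc h7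
          · exact absurd hc h8
          · omega
          · omega
          · omega
          · omega
          · omega
      rw [hk]
      decide
    rw [if_neg h9]
    by_cases h10 : (["automate", "automation", "auto", "automated"].any (fun keyword => PySem.Str.isIn keyword text)) = true
    · rw [if_pos h10]
      have hk : best = 10 := by
        have hle := hub 10 (pvMatched_intro text 10 ["automate", "automation", "auto", "automated"] (by rw [enum_groups]; simp) h10)
        rcases hmat with h | h
        · omega
        · rcases pvMatched_elim text best h with ⟨he, hc⟩ | ⟨he, hc⟩ | ⟨he, hc⟩ | ⟨he, hc⟩ | ⟨he, hc⟩ | ⟨he, hc⟩ | ⟨he, hc⟩ | ⟨he, hc⟩ | ⟨he, hc⟩ | ⟨he, hc⟩ | ⟨he, hc⟩ | ⟨he, hc⟩ | ⟨he, hc⟩ | ⟨he, hc⟩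
          · exact absurd hc h0
          · exact absurd hc h1
          · exact absurd hc h2
          · exact absurd hc h3
          · exact absurd hc h4
          · exact absurd hc h5
          · exact absurd hc h6
          · exact absurd hc h7
          · exact absurd hc h8
          · exact absurd hc h9
          · omega
          · omega
          · omega
          · omega
      rw [hk]
      decide
    rw [if_neg h10]
    by_cases h11 : (["below 4", "under 4", "4 days", "scenario", "simulator"].any (fun keyword => PySem.Str.isIn keyword text)) = true
    · rw [if_pos h11]
      have hk : best = 11 := by
        have hle := hub 11 (pvMatched_intro text 11 ["below 4", "under 4", "4 days", "scenario", "simulator"] (by rw [enum_groups]; simp) h11)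
        rcases hmat with h | h
        · omega
        · rcases pvMatched_elim text best h with ⟨he, hc⟩ | ⟨he, hc⟩ | ⟨he, hc⟩ | ⟨he, hc⟩ | ⟨he, hc⟩ | ⟨he, hc⟩ | ⟨he, hc⟩ | ⟨he, hc⟩ | ⟨he, hc⟩ | ⟨he, hc⟩ | ⟨he, hc⟩ | ⟨he, hc⟩ | ⟨he, hc⟩ | ⟨he, hc⟩
          · exact absurd hc h0
          · exact absurd hc h1
          · exact absurd hc h2
          · exact absurd hc h3
          · exact absurd hc h4
          · exact absurd hc h5
          · exact absurd hc h6
          · exact absurd hc h7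
          · exact absurd hc h8
          · exact absurd hc h9
          · exact absurd hc h10
          · omega
          · omega
          · omega
      rw [hk]
      decide
    rw [if_neg h11]
    by_cases h12 : (["cfo", "executive", "summary", "board"].any (fun keyword => PySem.Str.isIn keyword text)) = true
    · rw [if_pos h12]
      have hk : best = 12 := by
        have hle := hub 12 (pvMatched_intro text 12 ["cfo", "executive", "summary", "board"] (by rw [enum_groups]; simp) h12)
        rcases hmat with h | h
        · omega
        · rcases pvMatched_elim text best h with ⟨he, hc⟩ | ⟨he, hc⟩ | ⟨he, hc⟩ | ⟨he, hc⟩ | ⟨he, hc⟩ | ⟨he, hc⟩ | ⟨he, hc⟩ | ⟨he, hc⟩ | ⟨he, hc⟩ | ⟨he, hc⟩ | ⟨he, hc⟩ | ⟨he, hc⟩ | ⟨he, hc⟩ | ⟨he, hc⟩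
          · exact absurd hc h0
          · exact absurd hc h1
          · exact absurd hc h2
          · exact absurd hc h3
          · exact absurd hc h4
          · exact absurd hc h5
          · exact absurd hc h6
          · exact absurd hc h7
          · exact absurd hc h8
          · exact absurd hc h9
          · exact absurd hc h10
          · exact absurd hc h11
          · omega
          · omega
      rw [hk]
      decide
    rw [if_neg h12]
    by_cases h13 : (["delay", "blocker", "risk", "close"].any (fun keyword => PySem.Str.isIn keyword text)) = true
    · rw [if_pos h13]
      have hk : best = 13 := by
        have hle := hub 13 (pvMatched_intro text 13 ["delay", "blocker", "risk", "close"] (by rw [enum_groups]; simp) h13)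
        rcases hmat with h | h
        · omega
        · rcases pvMatched_elim text best h with ⟨he, hc⟩ | ⟨he, hc⟩ | ⟨he, hc⟩ | ⟨he, hc⟩ | ⟨he, hc⟩ | ⟨he, hc⟩ | ⟨he, hc⟩ | ⟨he, hc⟩ | ⟨he, hc⟩ | ⟨he, hc⟩ | ⟨he, hc⟩ | ⟨he, hc⟩ | ⟨he, hc⟩ | ⟨he, hc⟩
          · exact absurd hc h0
          · exact absurd hc h1
          · exact absurd hc h2
          · exact absurd hc h3
          · exact absurd hc h4
          · exact absurd hc h5
          · exact absurd hc h6
          · exact absurd hc h7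
          · exact absurd hc h8
          · exact absurd hc h9
          · exact absurd hc h10
          · exact absurd hc h11
          · exact absurd hc h12
          · omega
      rw [hk]
      decide
    rw [if_neg h13]
    have hk : best = 14 := by
      rcases hmat with h | h
      · exact h
      · rcases pvMatched_elim text best h with ⟨he, hc⟩ | ⟨he, hc⟩ | ⟨he, hc⟩ | ⟨he, hc⟩ | ⟨he, hc⟩ | ⟨he, hc⟩ | ⟨he, hc⟩ | ⟨he, hc⟩ | ⟨he, hc⟩ | ⟨he, hc⟩ | ⟨he, hc⟩ | ⟨he, hc⟩ | ⟨he, hc⟩ | ⟨he, hc⟩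
        · exact absurd hc h0
        · exact absurd hc h1
        · exact absurd hc h2
        · exact absurd hc h3
        · exact absurd hc h4
        · exact absurd hc h5
        · exact absurd hc h6
        · exact absurd hc h7
        · exact absurd hc h8
        · exact absurd hc h9
        · exact absurd hc h10
        · exact absurd hc h11
        · exact absurd hc h12
        · exact absurd hc h13
    rw [hk]
    decide
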